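-- pv_equiv track=rewrite | github.com/Ashiq-am/Path-of-Python | 3.Data Types/Python String/Programs of Python Strings/Concatenated string with uncommon characters in Python/Concatenated string with uncommon characters of two strings/Concatenated string with uncommon characters of two strings.py | concatenetedString
-- ===== SOURCE A (Python) =====
-- def concatenetedString(s1, s2):
--     res = ""  # result
--     m = {}
--
--     # store all characters of s2 in map
--     for i in range(0, len(s2)):
--         m[s2[i]] = 1
--
--     # Find characters of s1 that are not
--     # present in s2 and append to result
--     for i in range(0, len(s1)):
--         if (not s1[i] in m):
--             res = res + s1[i]
--         else:
--             m[s1[i]] = 2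
--
--     # Find characters of s2 that are not
--     # present in s1.
--     for i in range(0, len(s2)):
--         if (m[s2[i]] == 1):
--             res = res + s2[i]
--
--     return res
-- ===== SOURCE B (Python) =====
-- def concatenetedString(s1, s2):
--     # Delete every common character from both strings by repeated replace,
--     # driven by a scan of s1; what is left of each string is concatenated.
--     r1, r2 = s1, s2
--     for c in s1:
--         if c in s2:
--             r1 = r1.replace(c, '')
--             r2 = r2.replace(c, '')
--     return r1 + r2
-- ===== Notes on version B (the rewrite author's own statement) =====
-- stated objective: alternative
-- what changed: Instead of A's dict-marking and per-position filtering, B deletes the shared characters wholesale: it scans s1 and, for each character also found in s2, erases all its occurrences from both strings with replace, then concatenates the two residues.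
import Mathlib
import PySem

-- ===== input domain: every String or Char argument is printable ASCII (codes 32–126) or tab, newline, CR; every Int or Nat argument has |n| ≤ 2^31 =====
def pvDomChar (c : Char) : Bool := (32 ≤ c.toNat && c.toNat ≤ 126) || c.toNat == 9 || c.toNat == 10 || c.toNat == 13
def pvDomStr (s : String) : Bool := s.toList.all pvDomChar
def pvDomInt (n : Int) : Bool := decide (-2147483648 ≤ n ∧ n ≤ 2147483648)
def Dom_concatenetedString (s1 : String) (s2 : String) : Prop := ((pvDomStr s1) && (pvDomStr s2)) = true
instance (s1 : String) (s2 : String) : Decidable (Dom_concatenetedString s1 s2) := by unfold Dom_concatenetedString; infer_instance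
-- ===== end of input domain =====

-- B removes the shared characters by wholesale deletion (scan s1; for each char also in s2,
-- erase all its occurrences from both strings with replace) instead of A's dict-mark-and-filter.


-- ===== PORT A =====
-- Loop 1: for i in range(len(s2)): m[s2[i]] = 1
def pvLoop1 (l2 : List Char) : PySem.Dict Char Int :=
  l2.foldl (fun m c => m.insert c 1) PySem.Dict.empty

-- Loop 2: for i in range(len(s1)): if not s1[i] in m: res = res + s1[i] else: m[s1[i]] = 2
def pvLoop2 (l1 : List Char) (st : List Char × PySem.Dict Char Int) :
    List Char × PySem.Dict Char Int :=
  l1.foldl (fun st c => if st.2.contains c then (st.1, st.2.insert c 2) else (st.1 ++ [c], st.2)) st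

-- Loop 3: for i in range(len(s2)): if m[s2[i]] == 1: res = res + s2[i]
-- (every s2[i] is a key of m here, so the total `getD … 0` is exact: the default is never taken)
def pvLoop3 (l2 : List Char) (m : PySem.Dict Char Int) (res : List Char) : List Char :=
  l2.foldl (fun res c => if m.getD c 0 == 1 then res ++ [c] else res) res

def concatenetedString (s1 : String) (s2 : String) : String :=
  let m := pvLoop1 s2.toList
  let st := pvLoop2 s1.toList ([], m)
  String.ofList (pvLoop3 s2.toList st.2 st.1)

-- ===== PORT B =====
-- r1, r2 = s1, s2
-- for c in s1:
--     if c in s2: r1 = r1.replace(c, ''); r2 = r2.replace(c, '')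
-- return r1 + r2
def concatenetedString_alt (s1 : String) (s2 : String) : String :=
  let st := s1.toList.foldl
    (fun (p : String × String) c =>
      if PySem.Str.isIn (String.ofList [c]) s2 then
        (PySem.Str.replace p.1 (String.ofList [c]) "", PySem.Str.replace p.2 (String.ofList [c]) "")
      else p)
    (s1, s2)
  st.1 ++ st.2

-- ===== PRECONDITION & SPEC =====
def Spec_concatenetedString (s1 : String) (s2 : String) (out : String) : Prop := out = concatenetedString_alt s1 s2
instance (s1 : String) (s2 : String) (out : String) : Decidable (Spec_concatenetedString s1 s2 out) := by unfold Spec_concatenetedString; infer_instance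

-- ===== CLAIM (what is proved, stated in full; the proofs are below) =====
def Claim_equal_concatenetedString : Prop := ∀ (s1 : String) (s2 : String), Dom_concatenetedString s1 s2 → Spec_concatenetedString s1 s2 (concatenetedString s1 s2)

-- ===== LEMMAS AND PROOFS =====

-- After loop 1, m maps exactly the characters of l2, each to 1.
theorem pvLoop1_getD (l2 : List Char) (x : Char) :
    (pvLoop1 l2).getD x 0 = if x ∈ l2 then 1 else 0 := by
  suffices h : ∀ (d : PySem.Dict Char Int),
      (l2.foldl (fun m c => m.insert c 1) d).getD x 0 = if x ∈ l2 then 1 else d.getD x 0 by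
    simpa [pvLoop1, PySem.Dict.getD_empty] using h PySem.Dict.empty
  induction l2 with
  | nil => simp
  | cons c l ih =>
    intro d
    simp only [List.foldl_cons, ih, PySem.Dict.getD_insert, List.mem_cons]
    by_cases hx : x ∈ l <;> by_cases hc : x = c <;> simp [hx, hc]

theorem pvLoop1_contains (l2 : List Char) (x : Char) :
    (pvLoop1 l2).contains x = decide (x ∈ l2) := by
  suffices h : ∀ (d : PySem.Dict Char Int),
      (l2.foldl (fun m c => m.insert c 1) d).contains x = (decide (x ∈ l2) || d.contains x) by
    simpa [pvLoop1, PySem.Dict.contains_empty] using h PySem.Dict.empty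
  induction l2 with
  | nil => simp
  | cons c l ih =>
    intro d
    simp only [List.foldl_cons, ih, List.mem_cons]
    by_cases hx : x = c
    · simp [hx]
    · by_cases hl : x ∈ l <;> simp [PySem.Dict.contains_insert, hx, hl]

-- Loop 2: the result gains exactly the characters of l1 absent from m, and the
-- marks of m's keys hit by l1 are overwritten with 2 (the key set is unchanged).
theorem pvLoop2_spec (l1 : List Char) (res : List Char) (m : PySem.Dict Char Int) :
    (pvLoop2 l1 (res, m)).1 = res ++ l1.filter (fun c => !m.contains c) ∧
    ∀ x, (pvLoop2 l1 (res, m)).2.getD x 0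
        = if x ∈ l1 ∧ m.contains x then 2 else m.getD x 0 := by
  induction l1 generalizing res m with
  | nil => simp [pvLoop2]
  | cons c l ih =>
    simp only [pvLoop2] at ih ⊢
    by_cases hc : m.contains c = true
    · have key : ∀ y, (m.insert c (2:Int)).contains y = m.contains y := by
        intro y
        by_cases hy : y = c
        · simp [hy, hc]
        · simp [PySem.Dict.contains_insert, hy]
      obtain ⟨h1, h2⟩ := ih res (m.insert c 2)
      constructor
      · simp only [List.foldl_cons]
        rw [if_pos hc, h1]
        have hf : List.filter (fun y => !(m.insert c (2:Int)).contains y) l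
            = List.filter (fun y => !m.contains y) l :=
          List.filter_congr (fun y _ => by rw [key y])
        rw [hf, List.filter_cons]
        simp [hc]
      · intro x
        simp only [List.foldl_cons]
        rw [if_pos hc, h2 x, key x]
        by_cases hx : x = c
        · subst hx; simp [PySem.Dict.getD_insert_self, hc]
        · rw [PySem.Dict.getD_insert]
          simp [List.mem_cons, hx]
    · obtain ⟨h1, h2⟩ := ih (res ++ [c]) m
      constructor
      · simp only [List.foldl_cons]
        rw [if_neg hc, h1, List.filter_cons]
        simp [hc]
      · intro x
        simp only [List.foldl_cons]
        rw [if_neg hc, h2 x]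
        by_cases hx : x = c
        · subst hx; simp [hc]
        · simp [List.mem_cons, hx]

-- Loop 3 appends exactly the characters of l2 whose mark is still 1.
theorem pvLoop3_spec (l2 : List Char) (m : PySem.Dict Char Int) (res : List Char) :
    pvLoop3 l2 m res = res ++ l2.filter (fun c => m.getD c 0 == 1) := by
  simpa [pvLoop3] using PySem.List.foldl_append_if (fun c => m.getD c 0 == 1) id l2 res

-- A's core value: s1's chars not in s2, then s2's chars not in s1.
theorem a_core (l1 l2 : List Char) :
    pvLoop3 l2 (pvLoop2 l1 ([], pvLoop1 l2)).2 (pvLoop2 l1 ([], pvLoop1 l2)).1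
      = l1.filter (fun c => !decide (c ∈ l2)) ++ l2.filter (fun c => !decide (c ∈ l1)) := by
  obtain ⟨h1, h2⟩ := pvLoop2_spec l1 [] (pvLoop1 l2)
  rw [pvLoop3_spec, h1, List.nil_append]
  congr 1
  · exact List.filter_congr (fun x _ => by rw [pvLoop1_contains])
  · exact List.filter_congr (fun x hx => by
      rw [h2 x, pvLoop1_contains, pvLoop1_getD]
      by_cases h1x : x ∈ l1 <;> simp [h1x, hx])

-- s.replace(c, '') with a single-character pattern deletes exactly the occurrences of c.
theorem replace_go_singleton (c : Char) (l : List Char) :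
    ∀ (fuel : Nat) (acc : List Char), l.length ≤ fuel →
      PySem.Chars.replace.go [c] [] fuel l acc = acc.reverse ++ l.filter (fun x => x != c) := by
  induction l with
  | nil =>
    intro fuel acc _
    cases fuel <;> simp [PySem.Chars.replace.go]
  | cons c' t ih =>
    intro fuel acc hlen
    cases fuel with
    | zero => simp at hlen
    | succ f =>
      rw [PySem.Chars.replace.go]
      by_cases hc : c = c'
      · subst hc
        simp only [List.isPrefixOf, BEq.rfl, Bool.true_and, if_true]
        rw [show ([c] : List Char).length = 1 from rfl, List.drop_one, List.tail_cons,
          List.reverse_nil, List.nil_append, ih f acc (by simpa using Nat.le_of_succ_le_succ hlen)]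
        simp
      · have hpre : ([c] : List Char).isPrefixOf (c' :: t) = false := by
          simp [List.isPrefixOf, hc]
        rw [hpre]
        simp only [Bool.false_eq_true, if_false]
        rw [ih f (c' :: acc) (by simpa using Nat.le_of_succ_le_succ hlen)]
        simp [Ne.symm hc]

theorem replace_singleton (c : Char) (l : List Char) :
    PySem.Chars.replace l [c] [] = l.filter (fun x => x != c) := by
  rw [PySem.Chars.replace]
  simp only [List.isEmpty_cons, Bool.false_eq_true, if_false]
  simpa using replace_go_singleton c l l.length [] le_rfl

-- `c in s2` for a one-character pattern is membership of c in s2's characters.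
theorem isIn_singleton (c : Char) (s2 : String) :
    PySem.Str.isIn (String.ofList [c]) s2 = decide (c ∈ s2.toList) := by
  by_cases h : c ∈ s2.toList
  · simp only [h, decide_true]
    rw [PySem.Str.isIn_eq, String.toList_ofList,
      (PySem.Chars.isIn_iff_infix [c] s2.toList).2 ((List.singleton_infix_iff c s2.toList).2 h)]
  · simp only [h, decide_false]
    rw [PySem.Str.isIn_eq, String.toList_ofList, PySem.Chars.isIn_eq_false_iff]
    exact fun hinf => h ((List.singleton_infix_iff c s2.toList).1 hinf)

-- Invariant of B's loop: after the driver list l is consumed, each residue is its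
-- start value with every character lying both in l and in s2 deleted.
theorem b_fold_inv (s2 : String) (l : List Char) :
    ∀ (a b : String),
      ((l.foldl
          (fun (p : String × String) c =>
            if PySem.Str.isIn (String.ofList [c]) s2 then
              (PySem.Str.replace p.1 (String.ofList [c]) "", PySem.Str.replace p.2 (String.ofList [c]) "")
            else p)
          (a, b)).1.toList
        = a.toList.filter (fun x => !(decide (x ∈ l) && decide (x ∈ s2.toList)))) ∧
      ((l.foldl
          (fun (p : String × String) c =>
            if PySem.Str.isIn (String.ofList [c]) s2 then
              (PySem.Str.replace p.1 (String.ofList [c]) "", PySem.Str.replace p.2 (String.ofList [c]) "")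
            else p)
          (a, b)).2.toList
        = b.toList.filter (fun x => !(decide (x ∈ l) && decide (x ∈ s2.toList)))) := by
  induction l with
  | nil => intro a b; simp
  | cons c t ih =>
    intro a b
    simp only [List.foldl_cons]
    rw [isIn_singleton]
    by_cases hc : c ∈ s2.toList
    · rw [if_pos (by simp [hc])]
      obtain ⟨h1, h2⟩ := ih (PySem.Str.replace a (String.ofList [c]) "")
        (PySem.Str.replace b (String.ofList [c]) "")
      rw [h1, h2]
      have hr : ∀ s : String, (PySem.Str.replace s (String.ofList [c]) "").toList
          = s.toList.filter (fun x => x != c) := by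
        intro s
        rw [PySem.Str.replace, String.toList_ofList, String.toList_ofList]
        simpa using replace_singleton c s.toList
      rw [hr a, hr b, List.filter_filter, List.filter_filter]
      constructor <;>
        exact List.filter_congr (fun x _ => by
          by_cases hx : x = c
          · subst hx; simp [hc]
          · simp [hx])
    · rw [if_neg (by simp [hc])]
      obtain ⟨h1, h2⟩ := ih a b
      rw [h1, h2]
      constructor <;>
        exact List.filter_congr (fun x _ => by
          by_cases hx : x = c
          · subst hx; simp [hc]
          · simp [hx])

-- B's value is the same two filters, concatenated.
theorem b_core (s1 s2 : String) :
    (concatenetedString_alt s1 s2).toList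
      = s1.toList.filter (fun c => !decide (c ∈ s2.toList))
        ++ s2.toList.filter (fun c => !decide (c ∈ s1.toList)) := by
  obtain ⟨h1, h2⟩ := b_fold_inv s2 s1.toList s1 s2
  rw [concatenetedString_alt]
  simp only [String.toList_append]
  rw [h1, h2]
  congr 1
  · exact List.filter_congr (fun x hx => by simp [hx])
  · exact List.filter_congr (fun x hx => by simp [hx])

-- ===== VERDICT (by name: the statement is the Claim_ definition above) =====
theorem concatenetedString_spec : Claim_equal_concatenetedString := by
  intro s1 s2 _
  unfold Spec_concatenetedString
  apply String.toList_inj.mp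
  rw [concatenetedString, b_core]
  simp only [String.toList_ofList]
  exact a_core s1.toList s2.toList
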